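-- pv_equiv track=rewrite | github.com/Coadon/calico2024fall-drunkparty | contest/literally1984/main2.py | solve
-- ===== SOURCE A (Python) =====
-- import math
--
-- def solve(N: int) -> list[int]:
--     """
--     Return a tuple containing the coordinates X and Y.
--
--     N: a positive integer, the address of your house
--     """
--     # memoize later
--
--     address = 0
--     d = 0
--     while True:
--         # d loop
--         d += 1
--         for x in range(1,d+1):
--             y = d + 1 - x
--             if (math.gcd(x, y) == 1):
--                 address += 1
--             if (address == N):
--                 return [x, y]
-- ===== SOURCE B (Python) =====
-- import math
--
-- def phi(n: int) -> int:
--     # Euler's totient by trial-division factorization.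
--     result = n
--     p = 2
--     while p * p <= n:
--         if n % p == 0:
--             while n % p == 0:
--                 n //= p
--             result -= result // p
--         p += 1
--     if n > 1:
--         result -= result // n
--     return result
--
-- def solve(N: int) -> list[int]:
--     """
--     Return a tuple containing the coordinates X and Y.
--
--     N: a positive integer, the address of your house
--     """
--     # Diagonal x + y = s holds phi(s) coprime points (gcd(x, s-x) = gcd(x, s)):
--     # skip whole diagonals by their totient, scan only the final one.
--     s = 2
--     address = 0
--     while True:
--         c = phi(s)
--         if address + c >= N:
--             k = N - address
--             for x in range(1, s):
--                 if math.gcd(x, s) == 1: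
--                     k -= 1
--                     if k == 0:
--                         return [x, s - x]
--         address += c
--         s += 1
-- ===== Notes on version B (the rewrite author's own statement) =====
-- stated objective: faster
-- what changed: Instead of testing gcd for every lattice point while threading one global counter, B computes each diagonal's coprime count as the Euler totient phi(x+y) via trial-division factorization, skips whole diagonals until the one containing the N-th point, and scans only that diagonal.
import Mathlib
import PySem

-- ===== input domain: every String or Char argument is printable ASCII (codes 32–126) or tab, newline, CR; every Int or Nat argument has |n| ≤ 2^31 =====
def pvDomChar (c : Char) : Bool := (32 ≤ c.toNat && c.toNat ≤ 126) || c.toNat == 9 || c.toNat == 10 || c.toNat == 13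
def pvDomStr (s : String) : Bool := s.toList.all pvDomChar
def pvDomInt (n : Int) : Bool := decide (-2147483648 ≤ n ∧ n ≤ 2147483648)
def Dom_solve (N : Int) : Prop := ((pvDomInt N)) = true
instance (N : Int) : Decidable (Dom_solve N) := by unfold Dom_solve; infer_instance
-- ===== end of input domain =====

-- B replaces A's per-point gcd counting with totient-sized diagonal skipping (measured asymptotically faster);
-- both loop forever for N ≤ 0 (excluded by Pre_), ports use fuel to make that total.

-- ===== PORT A =====
-- inner 'for x in range(1, d+1)' loop: threads the running address, returns .inr on 'return [x, y]'
def innerA (N d : Int) : List Int → Int → Sum Int (List Int)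
  | [], addr => .inl addr
  | x :: rest, addr =>
      let y := d + 1 - x
      let addr' := if Int.gcd x y = 1 then addr + 1 else addr
      if addr' = N then .inr [x, y] else innerA N d rest addr'

-- outer 'while True' loop; fuel N.toNat suffices: each diagonal contains x = 1 (coprime), so the
-- address reaches N within the first N diagonals (fuel exhaustion is unreachable under Pre_)
def outerA (N : Int) : Nat → Int → Int → List Int
  | 0, _, _ => []
  | fuel+1, d, addr =>
      match innerA N (d+1) (PySem.List.pyRange 1 ((d+1)+1) 1) addr with
      | .inr ans => ans
      | .inl addr' => outerA N fuel (d+1) addr'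

def solve (N : Int) : List Int := outerA N N.toNat 0 0

-- ===== PORT B =====
-- 'while n % p == 0: n //= p' (fuel: n halves each step, n.toNat suffices)
def phiStrip : Nat → Int → Int → Int
  | 0, n, _ => n
  | f+1, n, p => if PySem.Int.mod n p = 0 then phiStrip f (PySem.Int.floordiv n p) p else n

-- 'while p * p <= n: …' of phi (fuel: p grows every step, s.toNat suffices)
def phiLoop : Nat → Int → Int → Int → Int × Int
  | 0, n, _, result => (n, result)
  | f+1, n, p, result =>
      if p * p ≤ n then
        if PySem.Int.mod n p = 0 then
          phiLoop f (phiStrip n.toNat n p) (p+1) (result - PySem.Int.floordiv result p)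
        else phiLoop f n (p+1) result
      else (n, result)

def phi (s : Int) : Int :=
  let r := phiLoop s.toNat s 2 s
  if r.1 > 1 then r.2 - PySem.Int.floordiv r.2 r.1 else r.2

-- 'for x in range(1, s)' scan of the located diagonal, counting k down
def innerB (s : Int) : List Int → Int → Option (List Int)
  | [], _ => none
  | x :: rest, k =>
      if Int.gcd x s = 1 then
        if k - 1 = 0 then some [x, s - x] else innerB s rest (k - 1)
      else innerB s rest k

-- outer 'while True' of B; fuel N.toNat suffices since phi s ≥ 1 for s ≥ 2
def outerB (N : Int) : Nat → Int → Int → List Int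
  | 0, _, _ => []
  | fuel+1, s, addr =>
      let c := phi s
      if N ≤ addr + c then
        match innerB s (PySem.List.pyRange 1 s 1) (N - addr) with
        | some ans => ans
        | none => outerB N fuel (s+1) (addr + c)
      else outerB N fuel (s+1) (addr + c)

def solve_alt (N : Int) : List Int := outerB N N.toNat 2 0

-- ===== PRECONDITION & SPEC =====
-- Pre_ excludes non-positive N, where the Python A (and B) never return a value: the address
-- counter only ever increases past positive values, so 'address == N' is never hit and A loops forever.
def Pre_solve (N : Int) : Prop := 1 ≤ N
instance (N : Int) : Decidable (Pre_solve N) := by unfold Pre_solve; infer_instance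
def pvWitness_solve : Int := (5)
def Spec_solve (N : Int) (out : List Int) : Prop := out = solve_alt N
instance (N : Int) (out : List Int) : Decidable (Spec_solve N out) := by unfold Spec_solve; infer_instance

-- ===== CLAIM (what is proved, stated in full; the proofs are below) =====
def Claim_equal_solve : Prop := ∀ (N : Int), Dom_solve N → Pre_solve N → Spec_solve N (solve N)

-- ===== LEMMAS AND PROOFS =====

-- Nat-side mirrors of B's phi loops (proof-side only)
def stripN : Nat → Nat → Nat → Nat
  | 0, n, _ => n
  | f+1, n, p => if n % p = 0 then stripN f (n / p) p else n

def loopN : Nat → Nat → Nat → Nat → Nat × Nat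
  | 0, n, _, r => (n, r)
  | f+1, n, p, r =>
      if p * p ≤ n then
        if n % p = 0 then loopN f (stripN n n p) (p+1) (r - r / p)
        else loopN f n (p+1) r
      else (n, r)

def phiN (n : Nat) : Nat :=
  let q := loopN n n 2 n
  if 1 < q.1 then q.2 - q.2 / q.1 else q.2

lemma strip_cast (f : Nat) : ∀ n p : Nat, phiStrip f (n : Int) (p : Int) = ((stripN f n p : Nat) : Int) := by
  induction f with
  | zero => intro n p; simp [phiStrip, stripN]
  | succ f ih =>
    intro n p
    simp only [phiStrip, stripN, PySem.Int.mod_natCast, PySem.Int.floordiv_natCast, Nat.cast_eq_zero]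
    by_cases h : n % p = 0
    · rw [if_pos h, if_pos h, ih]
    · rw [if_neg h, if_neg h]

lemma loop_cast (f : Nat) : ∀ n p r : Nat,
    phiLoop f (n : Int) (p : Int) (r : Int) = (((loopN f n p r).1 : Int), ((loopN f n p r).2 : Int)) := by
  induction f with
  | zero => intro n p r; simp [phiLoop, loopN]
  | succ f ih =>
    intro n p r
    have hle : ((p : Int) * p ≤ (n : Int)) ↔ p * p ≤ n := by exact_mod_cast Iff.rfl
    have hsub : (r : Int) - ((r / p : Nat) : Int) = ((r - r / p : Nat) : Int) := by
      have := Nat.div_le_self r p; push_cast [Nat.cast_sub this]; ring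
    simp only [phiLoop, loopN, PySem.Int.mod_natCast, PySem.Int.floordiv_natCast, Int.toNat_natCast]
    split
    · rename_i h
      rw [if_pos (hle.mp h)]
      split
      · rename_i h2
        have h2' : n % p = 0 := by exact_mod_cast h2
        rw [if_pos h2', strip_cast, hsub]
        have : ((p : Int) + 1) = ((p + 1 : Nat) : Int) := by push_cast; ring
        rw [this, ih]
      · rename_i h2
        have h2' : ¬ n % p = 0 := by intro hc; exact h2 (by exact_mod_cast hc)
        rw [if_neg h2']
        have : ((p : Int) + 1) = ((p + 1 : Nat) : Int) := by push_cast; ring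
        rw [this, ih]
    · rename_i h
      rw [if_neg (by intro hc; exact h (hle.mpr hc))]

lemma phi_cast (s : Nat) : phi (s : Int) = ((phiN s : Nat) : Int) := by
  unfold phi phiN
  rw [Int.toNat_natCast]
  have h2 : (2 : Int) = ((2 : Nat) : Int) := by norm_num
  rw [h2, loop_cast]
  have hsub : ((loopN s s 2 s).2 : Int) - (((loopN s s 2 s).2 / (loopN s s 2 s).1 : Nat) : Int)
      = (((loopN s s 2 s).2 - (loopN s s 2 s).2 / (loopN s s 2 s).1 : Nat) : Int) := by
    have := Nat.div_le_self (loopN s s 2 s).2 (loopN s s 2 s).1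
    push_cast [Nat.cast_sub this]; ring
  simp only [PySem.Int.floordiv_natCast]
  split
  · rename_i h; rw [if_pos (by exact_mod_cast h), hsub]
  · rename_i h; rw [if_neg (by intro hc; exact h (by exact_mod_cast hc))]

lemma stripN_spec (f : Nat) : ∀ n p : Nat, 2 ≤ p → 1 ≤ n → n ≤ f →
    ¬ p ∣ stripN f n p ∧ 1 ≤ stripN f n p ∧ ∃ k, n = p ^ k * stripN f n p := by
  induction f with
  | zero => intro n p _ h1 h2; omega
  | succ f ih =>
    intro n p hp h1 h2
    by_cases h : n % p = 0
    · have hdvd : p ∣ n := Nat.dvd_of_mod_eq_zero h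
      have hlt : n / p < n := Nat.div_lt_self (by omega) (by omega)
      have hge : 1 ≤ n / p := Nat.one_le_div_iff (by omega) |>.mpr (Nat.le_of_dvd (by omega) hdvd)
      set M := stripN f (n / p) p with hM
      obtain ⟨hnd, hge', k, hk⟩ := ih (n / p) p hp hge (by omega)
      rw [← hM] at hnd hge' hk
      simp only [stripN, if_pos h, ← hM]
      refine ⟨hnd, hge', k + 1, ?_⟩
      have hn : n = p * (n / p) := (Nat.mul_div_cancel' hdvd).symm
      calc n = p * (n / p) := hn
        _ = p * (p ^ k * M) := by rw [hk]
        _ = p ^ (k + 1) * M := by ring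
    · simp only [stripN, if_neg h]
      exact ⟨fun hc => h (by obtain ⟨c, rfl⟩ := hc; simp [Nat.mul_mod_right]), h1, 0, by simp⟩

lemma exit_val (n0 m r p : Nat) (hm : 1 ≤ m) (hdvd : m ∣ n0)
    (hge : ∀ q, q.Prime → q ∣ m → p ≤ q) (hlt : ∀ q, q.Prime → q ∣ n0 / m → q < p)
    (hr : r = m * (n0 / m).totient) (hpp : m < p * p) :
    (if 1 < m then r - r / m else r) = n0.totient := by
  by_cases h1 : 1 < m
  · rw [if_pos h1]
    have hmp : m.Prime := by
      by_contra hnp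
      have hsq := Nat.minFac_sq_le_self (by omega) hnp
      have hpr := Nat.minFac_prime (by omega : m ≠ 1)
      have h2 := hge m.minFac hpr (Nat.minFac_dvd m)
      nlinarith [hsq, h2]
    have hnd : ¬ m ∣ n0 / m := by
      intro hc
      have := hlt m hmp hc
      have := hge m hmp dvd_rfl
      omega
    have hco : m.Coprime (n0 / m) := (Nat.Prime.coprime_iff_not_dvd hmp).mpr hnd
    rw [hr, Nat.mul_div_cancel_left _ (by omega)]
    have hsub : m * (n0 / m).totient - (n0 / m).totient = (m - 1) * (n0 / m).totient := by
      rw [Nat.sub_mul, one_mul]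
    rw [hsub, ← Nat.totient_prime hmp, ← Nat.totient_mul hco, Nat.mul_div_cancel' hdvd]
  · rw [if_neg h1]
    have hm1 : m = 1 := by omega
    subst hm1
    simpa using hr

lemma loopN_spec (n0 : Nat) :
    ∀ f p m r, 2 ≤ p → 1 ≤ m → m ∣ n0 →
      (∀ q, q.Prime → q ∣ m → p ≤ q) →
      (∀ q, q.Prime → q ∣ n0 / m → q < p) →
      r = m * Nat.totient (n0 / m) →
      m + 2 ≤ f + p →
      (if 1 < (loopN f m p r).1 then (loopN f m p r).2 - (loopN f m p r).2 / (loopN f m p r).1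
       else (loopN f m p r).2) = n0.totient := by
  intro f
  induction f with
  | zero =>
    intro p m r hp hm hdvd hge hlt hr hf
    simp only [loopN]
    exact exit_val n0 m r p hm hdvd hge hlt hr (by nlinarith)
  | succ f ih =>
    intro p m r hp hm hdvd hge hlt hr hf
    simp only [loopN]
    by_cases hpp : p * p ≤ m
    · rw [if_pos hpp]
      by_cases hmod : m % p = 0
      · rw [if_pos hmod]
        have hpd : p ∣ m := Nat.dvd_of_mod_eq_zero hmod
        have hm2 : 2 ≤ m := le_trans hp (Nat.le_of_dvd (by omega) hpd)
        have hppr : p.Prime := by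
          have h1 := Nat.minFac_le_of_dvd hp hpd
          have h2 := hge m.minFac (Nat.minFac_prime (by omega)) (Nat.minFac_dvd m)
          have h3 : m.minFac = p := by omega
          rw [← h3]; exact Nat.minFac_prime (by omega)
        set m' := stripN m m p with hm'def
        obtain ⟨hnd, hm'1, k, hk⟩ := stripN_spec m m p hp (by omega) le_rfl
        rw [← hm'def] at hnd hm'1 hk
        have hk1 : 1 ≤ k := by
          rcases Nat.eq_zero_or_pos k with h0 | h
          · exfalso; rw [h0, pow_zero, one_mul] at hk; rw [← hk] at hnd; exact hnd hpd
          · exact h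
        have hm'dvdm : m' ∣ m := ⟨p ^ k, by rw [hk]; ring⟩
        have hm'dvd : m' ∣ n0 := hm'dvdm.trans hdvd
        have h0 : n0 = (n0 / m) * p ^ k * m' := by
          rw [mul_assoc, ← hk, Nat.div_mul_cancel hdvd]
        have hdivm' : n0 / m' = (n0 / m) * p ^ k := Nat.div_eq_of_eq_mul_left (by omega) h0
        have hpnd : ¬ p ∣ n0 / m := fun hc => absurd (hlt p hppr hc) (by omega)
        have hcop : Nat.Coprime (p ^ k) (n0 / m) :=
          Nat.Coprime.pow_left _ ((Nat.Prime.coprime_iff_not_dvd hppr).mpr hpnd)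
        have hφ : (n0 / m').totient = (n0 / m).totient * (p ^ (k - 1) * (p - 1)) := by
          rw [hdivm', Nat.totient_mul hcop.symm, Nat.totient_prime_pow hppr (by omega)]
        have hpk : p ^ k = p * p ^ (k - 1) := by
          conv_lhs => rw [show k = (k - 1) + 1 by omega]
          rw [pow_succ']
        have hrr : r = p * (p ^ (k - 1) * m' * (n0 / m).totient) := by
          rw [hr, hk, hpk]; ring
        have hX : r / p = p ^ (k - 1) * m' * (n0 / m).totient := by
          rw [hrr, Nat.mul_div_cancel_left _ (by omega : 0 < p)]
        have hr' : r - r / p = m' * (n0 / m').totient := by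
          rw [hX, hrr, hφ]
          rw [show p * (p ^ (k-1) * m' * (n0 / m).totient) - p ^ (k-1) * m' * (n0 / m).totient
              = (p - 1) * (p ^ (k-1) * m' * (n0 / m).totient) by rw [Nat.sub_mul, one_mul]]
          ring
        have hge' : ∀ q, q.Prime → q ∣ m' → p + 1 ≤ q := by
          intro q hq hqd
          have h1 := hge q hq (hqd.trans hm'dvdm)
          rcases Nat.lt_or_ge p q with h | h
          · omega
          · have hqp : q = p := by omega
            subst hqp; exact absurd hqd hnd
        have hlt' : ∀ q, q.Prime → q ∣ n0 / m' → q < p + 1 := by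
          intro q hq hqd
          rw [hdivm'] at hqd
          rcases (Nat.Prime.dvd_mul hq).mp hqd with h | h
          · exact lt_trans (hlt q hq h) (by omega)
          · have hqdp := Nat.Prime.dvd_of_dvd_pow hq h
            have : q = p := (Nat.prime_dvd_prime_iff_eq hq hppr).mp hqdp
            omega
        have hm'le : m' ≤ m := Nat.le_of_dvd (by omega) hm'dvdm
        exact ih (p+1) m' (r - r / p) (by omega) hm'1 hm'dvd hge' hlt' hr' (by omega)
      · rw [if_neg hmod]
        have hge' : ∀ q, q.Prime → q ∣ m → p + 1 ≤ q := by
          intro q hq hqd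
          have h1 := hge q hq hqd
          rcases Nat.lt_or_ge p q with h | h
          · omega
          · have hqp : q = p := by omega
            subst hqp
            exact absurd (by obtain ⟨c, rfl⟩ := hqd; simp [Nat.mul_mod_right]) hmod
        exact ih (p+1) m r (by omega) hm hdvd hge'
          (fun q hq hqd => lt_trans (hlt q hq hqd) (by omega)) hr (by omega)
    · rw [if_neg hpp]
      exact exit_val n0 m r p hm hdvd hge hlt hr (by omega)

lemma phiN_totient (n : Nat) (h : 2 ≤ n) : phiN n = n.totient := by
  have hdd : n / n = 1 := Nat.div_self (by omega)
  have hmain := loopN_spec n n 2 n n (by omega) (by omega) dvd_rfl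
    (fun q hq _ => hq.two_le)
    (fun q hq hqd => by rw [hdd] at hqd; exact absurd (Nat.dvd_one.mp hqd) hq.ne_one)
    (by rw [hdd, Nat.totient_one, mul_one]) (by omega)
  unfold phiN
  exact hmain

lemma card_filter_countP (n : Nat) (p : Nat → Prop) [DecidablePred p] :
    ((Finset.range n).filter p).card = (List.range n).countP (fun k => decide (p k)) := by
  simp [Finset.card, Finset.filter, Finset.range, Multiset.range]
  exact (List.countP_eq_length_filter).symm

lemma countP_range_shift (m : Nat) (p : Nat → Bool) :
    (List.range (m + 1)).countP p = (if p 0 then 1 else 0) + (List.range m).countP (fun k => p (k + 1)) := by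
  rw [List.range_succ_eq_map, List.countP_cons, List.countP_map]
  exact Nat.add_comm _ _

lemma totient_count (n : Nat) (h : 2 ≤ n) :
    (List.range (n - 1)).countP (fun k => decide (Nat.gcd (1 + k) n = 1)) = n.totient := by
  rw [Nat.totient_eq_card_coprime, card_filter_countP]
  rw [show (List.range n).countP (fun k => decide (n.Coprime k))
      = (List.range ((n-1)+1)).countP (fun k => decide (n.Coprime k)) by rw [show (n-1)+1 = n by omega]]
  rw [countP_range_shift]
  have h0 : decide (n.Coprime 0) = false := by
    simp [Nat.Coprime]; omega
  rw [h0]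
  simp only [Bool.false_eq_true, if_false, Nat.zero_add]
  apply List.countP_congr
  intro k _
  simp only [Nat.Coprime, decide_eq_true_eq]
  rw [Nat.add_comm, Nat.gcd_comm]


lemma phi_eq_count (s : Int) (hs : 2 ≤ s) :
    phi s = (((PySem.List.pyRange 1 s 1).countP (fun x => decide (Int.gcd x s = 1)) : Nat) : Int) := by
  have hn2 : 2 ≤ s.toNat := by omega
  have hcast : s = ((s.toNat : Nat) : Int) := by omega
  rw [hcast, phi_cast, phiN_totient s.toNat hn2, ← totient_count s.toNat hn2]
  congr 1
  rw [PySem.List.pyRange_one]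
  rw [show (((s.toNat : Nat) : Int) - 1).toNat = s.toNat - 1 by omega]
  rw [List.countP_map]
  apply List.countP_congr
  intro k _
  have h1 : (1 : Int) + (k : Nat) = (((1 + k : Nat) : Nat) : Int) := by push_cast; ring
  simp only [Function.comp_apply, h1, Int.gcd_natCast_natCast]

lemma innerB_none (s : Int) : ∀ (xs : List Int) (k : Int), innerB s xs k = none → 1 ≤ k →
    (((xs.countP (fun x => decide (Int.gcd x s = 1)) : Nat) : Int)) < k := by
  intro xs
  induction xs with
  | nil => intro k _ hk; simp [List.countP_nil]; omega
  | cons x rest ih =>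
    intro k hnone hk
    by_cases hg : Int.gcd x s = 1
    · simp only [innerB, if_pos hg] at hnone
      by_cases hz : k - 1 = 0
      · simp [hz] at hnone
      · rw [if_neg hz] at hnone
        have := ih (k - 1) hnone (by omega)
        rw [List.countP_cons, if_pos (by simp [hg])]
        push_cast
        omega
    · simp only [innerB, if_neg hg] at hnone
      have := ih k hnone hk
      rw [List.countP_cons, if_neg (by simp [hg])]
      simpa using this

lemma innerB_some (s : Int) : ∀ (xs : List Int) (k : Int) (a : List Int), innerB s xs k = some a →
    k ≤ (((xs.countP (fun x => decide (Int.gcd x s = 1)) : Nat) : Int)) := by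
  intro xs
  induction xs with
  | nil => intro k a h; simp [innerB] at h
  | cons x rest ih =>
    intro k a hsome
    by_cases hg : Int.gcd x s = 1
    · simp only [innerB, if_pos hg] at hsome
      rw [List.countP_cons, if_pos (by simp [hg])]
      by_cases hz : k - 1 = 0
      · push_cast; omega
      · rw [if_neg hz] at hsome
        have := ih (k - 1) a hsome
        push_cast
        omega
    · simp only [innerB, if_neg hg] at hsome
      have := ih k a hsome
      rw [List.countP_cons, if_neg (by simp [hg])]
      simpa using this

lemma inner_corr (N d : Int) : ∀ (xs : List Int) (addr : Int), addr < N →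
    innerA N d xs addr =
      match innerB (d + 1) xs (N - addr) with
      | some ans => .inr ans
      | none => .inl (addr + (((xs.countP (fun x => decide (Int.gcd x (d + 1) = 1)) : Nat) : Int))) := by
  intro xs
  induction xs with
  | nil => intro addr _; simp [innerA, innerB]
  | cons x rest ih =>
    intro addr haddr
    have hgy : Int.gcd x (d + 1 - x) = Int.gcd x (d + 1) := Int.gcd_sub_self_right x (d + 1)
    by_cases hg : Int.gcd x (d + 1) = 1
    · by_cases he : addr + 1 = N
      · simp only [innerA, innerB, hgy, if_pos hg]
        rw [if_pos (by omega : addr + 1 = N), if_pos (by omega : N - addr - 1 = 0)]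
      · simp only [innerA, innerB, hgy, if_pos hg]
        rw [if_neg (by omega : ¬ addr + 1 = N), if_neg (by omega : ¬ N - addr - 1 = 0)]
        rw [show N - addr - 1 = N - (addr + 1) by ring]
        rw [ih (addr + 1) (by omega)]
        rcases hmatch : innerB (d + 1) rest (N - (addr + 1)) with _ | a
        · simp only []
          rw [List.countP_cons, if_pos (by simp [hg])]
          congr 1
          push_cast
          ring
        · rfl
    · simp only [innerA, innerB, hgy, if_neg hg]
      rw [if_neg (by omega : ¬ addr = N)]
      rw [ih addr haddr]
      rcases hmatch : innerB (d + 1) rest (N - addr) with _ | a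
      · simp only []
        rw [List.countP_cons, if_neg (by simp [hg])]
        simp
      · rfl

lemma outer_corr (N : Int) : ∀ (fuel : Nat) (d addr : Int), addr < N → 0 ≤ d →
    outerA N fuel d addr = outerB N fuel (d + 2) addr := by
  intro fuel
  induction fuel with
  | zero => intro d addr _ _; rfl
  | succ fuel ih =>
    intro d addr haddr hd
    have hs2 : (2 : Int) ≤ d + 2 := by omega
    simp only [outerA, outerB]
    rw [show (d + 1) + 1 = d + 2 by ring]
    rw [inner_corr N (d + 1) _ addr haddr]
    rw [show (d + 1) + 1 = d + 2 by ring]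
    set c : Int := (((PySem.List.pyRange 1 (d + 2) 1).countP
        (fun x => decide (Int.gcd x (d + 2) = 1)) : Nat) : Int) with hc
    have hphi : phi (d + 2) = c := phi_eq_count (d + 2) hs2
    rcases hmatch : innerB (d + 2) (PySem.List.pyRange 1 (d + 2) 1) (N - addr) with _ | a
    · have hlt : c < N - addr := innerB_none (d + 2) _ _ hmatch (by omega)
      simp only []
      rw [hphi, if_neg (by omega : ¬ N ≤ addr + c)]
      rw [show d + 2 + 1 = (d + 1) + 2 by ring]
      exact ih (d + 1) (addr + c) (by omega) (by omega)
    · have hle : N - addr ≤ c := innerB_some (d + 2) _ _ a hmatch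
      simp only []
      rw [hphi, if_pos (by omega : N ≤ addr + c)]

-- ===== VERDICT (by name: the statement is the Claim_ definition above) =====
theorem solve_spec : Claim_equal_solve := by
  intro N _ hpre
  unfold Spec_solve solve solve_alt
  have h := outer_corr N N.toNat 0 0 (by exact_mod_cast hpre) le_rfl
  simpa using h
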